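-- pv_equiv track=rewrite | github.com/Ferothanes/Examensarbete | transforms/transform_utils.py | _select_categories
-- ===== SOURCE A (Python) =====
-- from typing import Dict, List, Set
--
-- def _select_categories(scores: Dict[str, int]) -> List[str]:
--     """
--     Pick top categories based on scores.
--     Rule: keep the top category; include a second if it is within 1 point of the top.
--     This matches: 5 vs 1 -> keep one; 4 vs 3 -> keep both.
--     """
--     if not scores:
--         return []
--
--     ordered = sorted(scores.items(), key=lambda x: (-x[1], x[0]))
--     top_score = ordered[0][1]
--     if top_score <= 0:
--         return []
--
--     selected = []
--     for cat, score in ordered: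
--         if score < top_score - 1:
--             break
--         selected.append(cat)
--         if len(selected) == 2:
--             break
--     return selected
-- ===== SOURCE B (Python) =====
-- from typing import Dict, List
--
-- def _lt(x, y):
--     # strictly earlier in the (-score, name) order
--     return x[1] > y[1] or (x[1] == y[1] and x[0] < y[0])
--
-- def _select_categories(scores: Dict[str, int]) -> List[str]:
--     # One pass: track the best and second-best items under the (-score, name) order.
--     best = None
--     second = None
--     for item in scores.items():
--         if best is None or _lt(item, best):
--             second = best
--             best = item
--         elif second is None or _lt(item, second):
--             second = item
--     if best is None or best[1] <= 0:
--         return []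
--     if second is not None and second[1] >= best[1] - 1:
--         return [best[0], second[0]]
--     return [best[0]]
-- ===== Notes on version B (the rewrite author's own statement) =====
-- stated objective: faster
-- what changed: B replaces A's full sort of the items by (-score, name) with a single pass that maintains the best and second-best item under that order, then applies the same top/within-1 rule.
import Mathlib
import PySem

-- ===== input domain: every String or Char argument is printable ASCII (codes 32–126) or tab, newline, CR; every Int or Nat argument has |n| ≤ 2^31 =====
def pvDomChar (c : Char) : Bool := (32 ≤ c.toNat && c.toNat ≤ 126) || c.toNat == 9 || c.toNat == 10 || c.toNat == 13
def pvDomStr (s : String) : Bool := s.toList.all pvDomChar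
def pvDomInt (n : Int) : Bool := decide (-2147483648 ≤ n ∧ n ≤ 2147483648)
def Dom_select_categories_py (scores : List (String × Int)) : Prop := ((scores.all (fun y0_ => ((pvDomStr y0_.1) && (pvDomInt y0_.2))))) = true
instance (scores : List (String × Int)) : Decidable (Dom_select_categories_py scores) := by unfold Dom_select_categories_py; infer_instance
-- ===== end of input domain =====

-- B replaces A's full sort of the items with a single pass that tracks the best and
-- second-best item under the same (-score, name) order (O(n) instead of O(n log n)).

-- ===== PORT A =====
-- the 'for cat, score in ordered' loop with its two breaks
def pvSelLoop : List (String × Int) → Int → List String → List String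
  | [], _, selected => selected
  | (cat, score) :: rest, top, selected =>
    if score < top - 1 then selected
    else
      let selected' := selected ++ [cat]
      if selected'.length = 2 then selected' else pvSelLoop rest top selected'

def select_categories_py (scores : List (String × Int)) : List String :=
  if scores = [] then []
  else
    let ordered := PySem.List.sorted2 scores (fun x => -x.2) (fun x => x.1)
    let top_score := (PySem.List.pyGetD ordered 0 ("", 0)).2
    if top_score ≤ 0 then []
    else pvSelLoop ordered top_score []

-- ===== PORT B =====
-- strictly earlier in the (-score, name) order
def pvLtB (x y : String × Int) : Bool := decide (y.2 < x.2) || (decide (x.2 = y.2) && decide (x.1 < y.1))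

def pvStep (st : Option (String × Int) × Option (String × Int)) (item : String × Int) :
    Option (String × Int) × Option (String × Int) :=
  match st with
  | (none, _) => (some item, none)
  | (some b, second) =>
    if pvLtB item b then (some item, some b)
    else
      match second with
      | none => (some b, some item)
      | some s => if pvLtB item s then (some b, some item) else (some b, some s)

def select_categories_py_alt (scores : List (String × Int)) : List String :=
  match scores.foldl pvStep (none, none) with
  | (none, _) => []
  | (some b, second) =>
    if b.2 ≤ 0 then []
    else
      match second with
      | some s => if b.2 - 1 ≤ s.2 then [b.1, s.1] else [b.1]
      | none => [b.1]

-- ===== PRECONDITION & SPEC =====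
def Spec_select_categories_py (scores : List (String × Int)) (out : List String) : Prop := out = select_categories_py_alt scores
instance (scores : List (String × Int)) (out : List String) : Decidable (Spec_select_categories_py scores out) := by unfold Spec_select_categories_py; infer_instance

-- ===== CLAIM (what is proved, stated in full; the proofs are below) =====
def Claim_equal_select_categories_py : Prop := ∀ (scores : List (String × Int)), Dom_select_categories_py scores → Spec_select_categories_py scores (select_categories_py scores)

-- ===== LEMMAS AND PROOFS =====

-- the comparator sorted2 uses internally for the key (fun x => (-x.2, x.1))
def pvBefore (a b : String × Int) : Bool :=
  decide (-a.2 < -b.2) || (!decide (-b.2 < -a.2) && decide (a.1 < b.1))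

lemma pvLtB_eq_before (x y : String × Int) : pvLtB x y = pvBefore x y := by
  simp only [pvLtB, pvBefore, neg_lt_neg_iff]
  rcases lt_trichotomy x.2 y.2 with h | h | h
  · simp [h, LT.lt.ne h, asymm h]
  · simp [h]
  · simp [h]

lemma sorted2_eq_foldl (xs : List (String × Int)) :
    PySem.List.sorted2 xs (fun x => -x.2) (fun x => x.1) =
      xs.foldl (fun acc x => PySem.List.insertBy pvBefore x acc) [] := by
  rfl

lemma insertBy_nil (f : (String × Int) → (String × Int) → Bool) (x : String × Int) :
    PySem.List.insertBy f x [] = [x] := rfl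

lemma insertBy_cons (f : (String × Int) → (String × Int) → Bool) (x y : String × Int)
    (ys : List (String × Int)) :
    PySem.List.insertBy f x (y :: ys) =
      if f x y then x :: y :: ys else y :: PySem.List.insertBy f x ys := rfl

-- one step: inserting x into acc changes the first two slots exactly as pvStep does
lemma step_first2 (acc : List (String × Int)) (x : String × Int) :
    pvStep (acc[0]?, acc[1]?) x =
      ((PySem.List.insertBy pvBefore x acc)[0]?, (PySem.List.insertBy pvBefore x acc)[1]?) := by
  match acc with
  | [] => simp [pvStep, insertBy_nil]
  | [a] =>
    simp only [insertBy_cons, insertBy_nil, pvStep, pvLtB_eq_before]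
    split_ifs <;> simp_all
  | a :: b :: t =>
    simp only [insertBy_cons, pvStep, pvLtB_eq_before]
    split_ifs <;> simp_all

-- the whole pass: B's fold state is always the first two slots of A's insertion-sorted list
lemma fold_first2 (xs : List (String × Int)) :
    ∀ acc : List (String × Int),
      xs.foldl pvStep (acc[0]?, acc[1]?) =
        ((xs.foldl (fun a x => PySem.List.insertBy pvBefore x a) acc)[0]?,
         (xs.foldl (fun a x => PySem.List.insertBy pvBefore x a) acc)[1]?) := by
  induction xs with
  | nil => intro acc; simp
  | cons x xs ih =>
    intro acc
    simp only [List.foldl_cons, step_first2]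
    exact ih (PySem.List.insertBy pvBefore x acc)

lemma sorted2_ne_nil (xs : List (String × Int)) (h : xs ≠ []) :
    PySem.List.sorted2 xs (fun x => -x.2) (fun x => x.1) ≠ [] := by
  intro hnil
  have := PySem.List.sorted2_perm xs (fun x => -x.2) (fun x => x.1) false
  rw [hnil] at this
  exact h (this.nil_eq.symm)

-- ===== VERDICT (by name: the statement is the Claim_ definition above) =====
theorem select_categories_py_spec : Claim_equal_select_categories_py := by
  intro scores _
  unfold Spec_select_categories_py select_categories_py select_categories_py_alt
  by_cases h : scores = []
  · subst h; simp
  · simp only [if_neg h]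
    have hfold := fold_first2 scores []
    simp only [List.getElem?_nil] at hfold
    rw [← sorted2_eq_foldl] at hfold
    rw [hfold]
    obtain ⟨p0, rest, hord⟩ :=
      List.exists_cons_of_ne_nil (sorted2_ne_nil scores h)
    rw [hord]
    have htop : (PySem.List.pyGetD (p0 :: rest) 0 ("", 0)).2 = p0.2 := by
      simp [PySem.List.pyGetD, PySem.List.pyGet?, PySem.List.pyIdx?]
    rw [htop]
    by_cases hpos : p0.2 ≤ 0
    · simp [hpos]
    · simp only [if_neg hpos]
      have hpos' : 0 < p0.2 := by omega
      match rest with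
      | [] =>
        simp [pvSelLoop, hpos', show ¬ (p0.2 < p0.2 - 1) by omega]
      | p1 :: r2 =>
        simp only [pvSelLoop, show ¬ (p0.2 < p0.2 - 1) by omega, if_false,
          List.nil_append, List.length_singleton]
        by_cases h1 : p1.2 < p0.2 - 1
        · simp [h1, hpos', show ¬ (p0.2 - 1 ≤ p1.2) by omega]
        · simp [h1, hpos', show p0.2 - 1 ≤ p1.2 by omega]
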